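-- pv_equiv track=rewrite | github.com/JaeHong-Park987/Programmers | 프로그래머스/lv0/120861. 캐릭터의 좌표/캐릭터의 좌표.py | solution
-- ===== SOURCE A (Python) =====
-- def solution(keyinput, board):
--     answer = [0,0]
--     board[0] = board[0] // 2
--     board[1] = board[1] // 2
--
--     for j in keyinput:
--         if j == 'left' and answer[0] > -1 * board[0] :
--             answer[0] -= 1
--         elif j == 'right' and answer[0] < board[0] :
--             answer[0] += 1
--         elif j == 'up' and answer[1] < board[1] :
--             answer[1] += 1
--         elif j == 'down' and answer[1] > -1 * board[1] :
--             answer[1] -= 1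
--
-- #         while (abs(answer[0]) > board[0]):
-- #             if answer[0] > 0:
-- #                 answer[0] -= 1
-- #             elif answer[0] < 0:
-- #                 answer[0] += 1
--
-- #         while (abs(answer[1]) > board[1]):
-- #             if answer[1] > 0:
-- #                 answer[1] -= 1
-- #             elif answer[1] < 0:
-- #                 answer[1] += 1
--     return answer
-- ===== SOURCE B (Python) =====
-- def solution(keyinput, board):
--     # same in-place halving of board as A (observable side effect)
--     board[0] //= 2
--     board[1] //= 2
--
--     def walk(half, dec, inc):
--         p = 0
--         for k in keyinput:
--             if k == dec and p > -half:
--                 p -= 1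
--             elif k == inc and p < half:
--                 p += 1
--         return p
--
--     return [walk(board[0], 'left', 'right'), walk(board[1], 'down', 'up')]
-- ===== Notes on version B (the rewrite author's own statement) =====
-- stated objective: alternative
-- what changed: A's single loop over a mutable two-cell answer with four branches is replaced by a generic one-axis bounded-walk helper applied twice (horizontal pass with left/right, vertical pass with down/up), each pass tracking a single scalar; Pre_ excludes boards of fewer than 2 elements, where both programs raise IndexError.
import Mathlib
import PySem

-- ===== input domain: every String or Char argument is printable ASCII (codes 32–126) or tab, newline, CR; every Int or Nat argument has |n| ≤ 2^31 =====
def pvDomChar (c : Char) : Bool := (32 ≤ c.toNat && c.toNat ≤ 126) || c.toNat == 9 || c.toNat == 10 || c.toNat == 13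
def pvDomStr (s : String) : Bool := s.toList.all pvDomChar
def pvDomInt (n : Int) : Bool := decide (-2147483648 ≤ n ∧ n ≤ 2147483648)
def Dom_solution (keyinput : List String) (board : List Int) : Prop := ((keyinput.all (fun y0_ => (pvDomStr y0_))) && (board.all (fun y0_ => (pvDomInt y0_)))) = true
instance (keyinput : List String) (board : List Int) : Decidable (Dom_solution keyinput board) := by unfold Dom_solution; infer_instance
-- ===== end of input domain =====

-- B replaces A's single four-branch loop over a mutable [x,y] pair by a generic one-axis
-- bounded-walk helper applied twice (alternative decomposition, same cost). Both A and B
-- halve board[0], board[1] in place; the equivalence proved is about the return value.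


-- ===== PORT A =====
-- one pass over keyinput, state = (answer[0], answer[1]), four guarded branches
def solution (keyinput : List String) (board : List Int) : List Int :=
  match board with
  | b0 :: b1 :: _ =>
    let bx := PySem.Int.floordiv b0 2
    let by_ := PySem.Int.floordiv b1 2
    let ans := keyinput.foldl (fun (a : Int × Int) j =>
      if j = "left" ∧ a.1 > -1 * bx then (a.1 - 1, a.2)
      else if j = "right" ∧ a.1 < bx then (a.1 + 1, a.2)
      else if j = "up" ∧ a.2 < by_ then (a.1, a.2 + 1)
      else if j = "down" ∧ a.2 > -1 * by_ then (a.1, a.2 - 1)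
      else a) (0, 0)
    [ans.1, ans.2]
  | _ => []  -- board[0] access raises IndexError in Python; excluded by Pre_

-- ===== PORT B =====
-- generic one-axis bounded walk (Source B's 'walk')
def pvWalk (keyinput : List String) (half : Int) (dec inc : String) : Int :=
  keyinput.foldl (fun p k =>
    if k = dec ∧ p > -half then p - 1
    else if k = inc ∧ p < half then p + 1
    else p) 0

def solution_alt (keyinput : List String) (board : List Int) : List Int :=
  if board.length < 2 then []  -- board[0] //= 2 raises IndexError in Python; excluded by Pre_
  else
    [pvWalk keyinput (PySem.Int.floordiv ((PySem.List.pyGet? board 0).getD 0) 2) "left" "right",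
     pvWalk keyinput (PySem.Int.floordiv ((PySem.List.pyGet? board 1).getD 0) 2) "down" "up"]

-- ===== PRECONDITION & SPEC =====
-- A (and B) index board[0] and board[1]: both raise IndexError on boards shorter than 2.
def Pre_solution (keyinput : List String) (board : List Int) : Prop := 2 ≤ board.length
instance (keyinput : List String) (board : List Int) : Decidable (Pre_solution keyinput board) := by unfold Pre_solution; infer_instance
def pvWitness_solution : List String × List Int := (["left", "up", "up"], [10, 6])
def Spec_solution (keyinput : List String) (board : List Int) (out : List Int) : Prop := out = solution_alt keyinput board
instance (keyinput : List String) (board : List Int) (out : List Int) : Decidable (Spec_solution keyinput board out) := by unfold Spec_solution; infer_instance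

-- ===== CLAIM (what is proved, stated in full; the proofs are below) =====
def Claim_equal_solution : Prop := ∀ (keyinput : List String) (board : List Int), Dom_solution keyinput board → Pre_solution keyinput board → Spec_solution keyinput board (solution keyinput board)

-- ===== LEMMAS AND PROOFS =====

-- the combined fold of A runs the two axis walks of B componentwise
theorem pvFold_split (keyinput : List String) (bx by_ : Int) (x y : Int) :
    keyinput.foldl (fun (a : Int × Int) j =>
      if j = "left" ∧ a.1 > -1 * bx then (a.1 - 1, a.2)
      else if j = "right" ∧ a.1 < bx then (a.1 + 1, a.2)
      else if j = "up" ∧ a.2 < by_ then (a.1, a.2 + 1)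
      else if j = "down" ∧ a.2 > -1 * by_ then (a.1, a.2 - 1)
      else a) (x, y)
    = (keyinput.foldl (fun p k =>
        if k = "left" ∧ p > -bx then p - 1
        else if k = "right" ∧ p < bx then p + 1
        else p) x,
       keyinput.foldl (fun p k =>
        if k = "down" ∧ p > -by_ then p - 1
        else if k = "up" ∧ p < by_ then p + 1
        else p) y) := by
  induction keyinput generalizing x y with
  | nil => rfl
  | cons j rest ih =>
    simp only [List.foldl_cons]
    have hstep :
        (if j = "left" ∧ x > -1 * bx then (x - 1, y)
         else if j = "right" ∧ x < bx then (x + 1, y)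
         else if j = "up" ∧ y < by_ then (x, y + 1)
         else if j = "down" ∧ y > -1 * by_ then (x, y - 1)
         else (x, y))
        = ((if j = "left" ∧ x > -bx then x - 1
            else if j = "right" ∧ x < bx then x + 1 else x),
           (if j = "down" ∧ y > -by_ then y - 1
            else if j = "up" ∧ y < by_ then y + 1 else y)) := by
      by_cases hl : j = "left" <;> by_cases hr : j = "right" <;>
        by_cases hu : j = "up" <;> by_cases hd : j = "down" <;>
        simp_all <;> split_ifs <;> simp_all <;> omega
    rw [hstep, ih]

theorem solution_eq_alt (keyinput : List String) (board : List Int)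
    (hpre : Pre_solution keyinput board) :
    solution keyinput board = solution_alt keyinput board := by
  match board with
  | [] => simp [Pre_solution] at hpre
  | [_] => simp [Pre_solution] at hpre
  | b0 :: b1 :: rest =>
    have h0 : (PySem.List.pyGet? (b0 :: b1 :: rest) 0).getD 0 = b0 := by
      have hc : (0:Int) ≤ (rest.length:Int) + 1 := by omega
      simp [PySem.List.pyGet?, PySem.List.pyIdx?, hc]
    have h1 : (PySem.List.pyGet? (b0 :: b1 :: rest) 1).getD 0 = b1 := by
      have hc : (1:Int) ≤ (rest.length:Int) + 1 := by omega
      simp [PySem.List.pyGet?, PySem.List.pyIdx?, hc]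
    simp only [solution, solution_alt, pvWalk, h0, h1]
    rw [pvFold_split]
    simp

-- ===== VERDICT (by name: the statement is the Claim_ definition above) =====
theorem solution_spec : Claim_equal_solution := by
  intro keyinput board _ hpre
  exact solution_eq_alt keyinput board hpre
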